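-- pv_equiv track=rewrite | github.com/cpulabs/mist32-processor-verification-tool | tool/inst-level/gen_expect/instruction.py | gen_expect_rol
-- ===== SOURCE A (Python) =====
-- def gen_expect_rol(src0, src1):
-- 	result = src0
-- 	loop = 0;
-- 	for cnt in range(src1):
-- 		result = result << 1
-- 		loop = (result >> 32) & 1;
-- 		result = (result & 0xfffffffe) | loop
-- 	return result & 0xFFFFFFFF;
-- ===== SOURCE B (Python) =====
-- def gen_expect_rol(src0, src1):
--     x = src0 & 0xFFFFFFFF
--     s = max(src1, 0) % 32
--     return ((x << s) | (x >> (32 - s))) & 0xFFFFFFFF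
-- ===== Notes on version B (the rewrite author's own statement) =====
-- stated objective: faster
-- what changed: A rotates the low 32 bits left one bit at a time in a loop of src1 iterations; B computes the same rotation in closed form with one shift/or by src1 mod 32 (no rotation for src1 <= 0, matching A's empty loop).
import Mathlib
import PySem

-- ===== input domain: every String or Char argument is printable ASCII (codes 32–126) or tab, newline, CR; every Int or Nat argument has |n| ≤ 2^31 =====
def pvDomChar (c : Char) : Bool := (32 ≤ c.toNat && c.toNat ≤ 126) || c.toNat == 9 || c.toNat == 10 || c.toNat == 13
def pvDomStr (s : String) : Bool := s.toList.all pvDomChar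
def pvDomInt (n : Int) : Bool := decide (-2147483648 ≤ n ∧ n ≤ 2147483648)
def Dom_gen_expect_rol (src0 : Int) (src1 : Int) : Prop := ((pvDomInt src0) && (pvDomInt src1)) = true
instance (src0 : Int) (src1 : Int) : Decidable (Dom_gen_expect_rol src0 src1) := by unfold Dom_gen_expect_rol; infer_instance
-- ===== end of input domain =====

-- B replaces A's one-bit-per-iteration rotation loop (src1 iterations) by a single
-- closed-form shift/or rotate of the low 32 bits by src1 mod 32: O(1) instead of O(src1).


-- ===== PORT A =====
-- literal port: fold the loop body (state = (result, loop)) over range(src1)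
def gen_expect_rol (src0 : Int) (src1 : Int) : Int :=
  PySem.Int.band
    (((PySem.List.pyRange 0 src1 1).foldl
        (fun (st : Int × Int) _cnt =>
          let result := st.1 <<< (1 : ℕ)
          let loop := PySem.Int.band (result >>> (32 : ℕ)) 1
          (PySem.Int.bor (PySem.Int.band result 0xfffffffe) loop, loop))
        (src0, 0)).1)
    0xFFFFFFFF

-- ===== PORT B =====
-- shift amounts: s = (max src1 0) % 32 is nonneg and < 32, so the Nat shifts are exact
def gen_expect_rol_alt (src0 : Int) (src1 : Int) : Int :=
  let x := PySem.Int.band src0 0xFFFFFFFF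
  let s := (PySem.Int.mod (max src1 0) 32).toNat
  PySem.Int.band (PySem.Int.bor (x <<< s) (x >>> (32 - s))) 0xFFFFFFFF

-- ===== PRECONDITION & SPEC =====
def Spec_gen_expect_rol (src0 : Int) (src1 : Int) (out : Int) : Prop := out = gen_expect_rol_alt src0 src1
instance (src0 : Int) (src1 : Int) (out : Int) : Decidable (Spec_gen_expect_rol src0 src1 out) := by unfold Spec_gen_expect_rol; infer_instance

-- ===== CLAIM (what is proved, stated in full; the proofs are below) =====
def Claim_equal_gen_expect_rol : Prop := ∀ (src0 : Int) (src1 : Int), Dom_gen_expect_rol src0 src1 → Spec_gen_expect_rol src0 src1 (gen_expect_rol src0 src1)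

-- ===== LEMMAS AND PROOFS =====

-- A's loop body on the result component, and its Nat-level meaning
def pvF (r : Int) : Int :=
  PySem.Int.bor (PySem.Int.band (r <<< (1 : ℕ)) 0xfffffffe) (PySem.Int.band ((r <<< (1 : ℕ)) >>> (32 : ℕ)) 1)

def pvStep (r : ℕ) : ℕ := 2 * (r % 2 ^ 31) + r / 2 ^ 31

def pvRol (x s : ℕ) : ℕ := x % 2 ^ (32 - s) * 2 ^ s + x / 2 ^ (32 - s)

-- A's fold only threads the result component through pvF
lemma pv_fold_fst (l : List Int) : ∀ (p : Int × Int),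
    (l.foldl
        (fun (st : Int × Int) _cnt =>
          let result := st.1 <<< (1 : ℕ)
          let loop := PySem.Int.band (result >>> (32 : ℕ)) 1
          (PySem.Int.bor (PySem.Int.band result 0xfffffffe) loop, loop))
        p).1 = pvF^[l.length] p.1 := by
  induction l with
  | nil => intro p; rfl
  | cons a l ih =>
    intro p
    simp only [List.foldl_cons, List.length_cons, Function.iterate_succ_apply]
    rw [ih]
    rfl

-- (a <<< n) ||| b is addition when b fits below the shift
lemma pv_or_shift {n : ℕ} (a b : ℕ) (hb : b < 2 ^ n) : (a <<< n) ||| b = a * 2 ^ n + b := by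
  apply Nat.eq_of_testBit_eq
  intro i
  rw [Nat.testBit_or, Nat.testBit_shiftLeft,
    show a * 2 ^ n + b = 2 ^ n * a + b by ring, Nat.testBit_two_pow_mul_add a hb]
  by_cases h : i < n
  · simp [h, show ¬ n ≤ i by omega]
  · have hbi : b.testBit i = false :=
      Nat.testBit_lt_two_pow (lt_of_lt_of_le hb (Nat.pow_le_pow_right (by norm_num) (by omega)))
    simp [h, show n ≤ i by omega, hbi]

lemma pv_or_even (m q : ℕ) (hq : q < 2) : 2 * m ||| q = 2 * m + q := by
  have h := pv_or_shift (n := 1) m q (by omega)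
  simpa [Nat.shiftLeft_eq, mul_comm] using h

lemma pv_pow_pred {t : ℕ} (h : 1 ≤ t) : 2 ^ t = 2 * 2 ^ (t - 1) := by
  conv_lhs => rw [show t = (t - 1) + 1 by omega]
  ring

-- masking with 0xfffffffe clears bit 0 and keeps bits 1..31
lemma pv_and_fffe (w : ℕ) : w &&& 0xfffffffe = 2 * (w / 2 % 2 ^ 31) := by
  apply Nat.eq_of_testBit_eq
  intro i
  rw [show (0xfffffffe : ℕ) = (2 ^ 31 - 1) <<< 1 by norm_num [Nat.shiftLeft_eq],
    show 2 * (w / 2 % 2 ^ 31) = (w >>> 1 % 2 ^ 31) <<< 1 by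
      rw [Nat.shiftLeft_eq, Nat.shiftRight_eq_div_pow]; ring_nf,
    Nat.testBit_and, Nat.testBit_shiftLeft, Nat.testBit_shiftLeft,
    Nat.testBit_two_pow_sub_one, Nat.testBit_mod_two_pow, Nat.testBit_shiftRight]
  by_cases h : 1 ≤ i
  · have hone : 1 + (i - 1) = i := by omega
    simp [h, hone, Bool.and_comm]
  · have : i = 0 := by omega
    subst this
    simp

lemma pv_and_mask (w : ℕ) : w &&& 0xffffffff = w % 2 ^ 32 := by
  rw [show (0xffffffff : ℕ) = 2 ^ 32 - 1 by norm_num, Nat.and_two_pow_sub_one_eq_mod]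

-- low 32 bits of an Int in [-2^31, 2^32)
lemma pv_low (a : Int) (h1 : -(2 ^ 31) ≤ a) (h2 : a < 2 ^ 32) :
    PySem.Int.band a 0xFFFFFFFF = ((a % 2 ^ 32).toNat : Int) := by
  by_cases ha : 0 ≤ a
  · rw [PySem.Int.band_of_nonneg ha (by norm_num)]
    rw [show (0xFFFFFFFF : Int).toNat = 0xffffffff from rfl, pv_and_mask]
    omega
  · unfold PySem.Int.band
    rw [if_neg ha, if_pos (by norm_num : (0 : Int) ≤ 0xFFFFFFFF)]
    rw [show (0xFFFFFFFF : Int).toNat = 0xffffffff from rfl, Nat.and_comm, pv_and_mask]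
    omega

lemma pvStep_lt {r : ℕ} (h : r < 2 ^ 32) : pvStep r < 2 ^ 32 := by
  unfold pvStep; omega

-- one Python loop iteration = pvStep on the low 32 bits
lemma pv_step_bridge (r : Int) (h1 : -(2 ^ 31) ≤ r) (h2 : r < 2 ^ 32) :
    pvF r = (pvStep (r % 2 ^ 32).toNat : Int) := by
  unfold pvF
  rw [Int.shiftLeft_eq, Int.shiftRight_eq_div_pow]
  norm_num
  by_cases hr : 0 ≤ r
  · rw [PySem.Int.band_of_nonneg (by omega) (by norm_num : (0:Int) ≤ 0xfffffffe)]
    rw [show (0xfffffffe : Int).toNat = 0xfffffffe from rfl, pv_and_fffe]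
    have hdiv : r * 2 / (4294967296 : Int) = ((r.toNat / 2 ^ 31 : ℕ) : Int) := by
      push_cast; omega
    rw [hdiv]
    rw [show ((1 : Int)) = ((1 : ℕ) : Int) from rfl, PySem.Int.band_natCast, PySem.Int.bor_natCast]
    rw [Nat.and_one_is_mod, pv_or_even _ _ (by omega)]
    unfold pvStep
    congr 1
    omega
  · -- r < 0: the shifted value is negative; unfold band's negative branch
    have hneg : ¬ (0 : Int) ≤ r * 2 := by omega
    have hband : PySem.Int.band (r * 2) 0xfffffffe =
        ((0xfffffffe - (0xfffffffe &&& (-(r * 2) - 1).toNat) : ℕ) : Int) := by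
      unfold PySem.Int.band
      rw [if_neg hneg, if_pos (by norm_num : (0:Int) ≤ 0xfffffffe)]
      rfl
    rw [hband]
    have hdiv : r * 2 / (4294967296 : Int) = -1 := by omega
    rw [hdiv]
    have hb1 : PySem.Int.band (-1) 1 = ((1 : ℕ) : Int) := by decide
    rw [hb1]
    set m := (2 ^ 32 - 1 - (r % 2 ^ 32)).toNat with hm0
    have hmlt : m < 2 ^ 31 := by omega
    have hu : (-(r * 2) - 1).toNat = 2 * m + 1 := by omega
    have hand : (0xfffffffe : ℕ) &&& (2 * m + 1) = 2 * m := by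
      rw [Nat.and_comm, pv_and_fffe]
      omega
    rw [hu, hand]
    have hsub : (0xfffffffe : ℕ) - 2 * m = 2 * (2147483647 - m) := by omega
    rw [hsub, PySem.Int.bor_natCast, pv_or_even _ _ (by omega)]
    unfold pvStep
    congr 1
    omega

lemma pv_iter_bridge (k : ℕ) : ∀ y : ℕ, y < 2 ^ 32 → pvF^[k] ((y : ℕ) : Int) = ((pvStep^[k] y : ℕ) : Int) := by
  induction k with
  | zero => intro y _; rfl
  | succ k ih =>
    intro y hy
    rw [Function.iterate_succ_apply, Function.iterate_succ_apply]
    rw [pv_step_bridge (y : Int) (by omega) (by exact_mod_cast hy)]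
    have hyy : (((y : Int)) % 2 ^ 32).toNat = y := by omega
    rw [hyy]
    exact ih (pvStep y) (pvStep_lt hy)

lemma pv_rol_lt (x s : ℕ) (hx : x < 2 ^ 32) (hs : s < 32) : pvRol x s < 2 ^ 32 := by
  unfold pvRol
  have hpos : 0 < 2 ^ (32 - s) := by positivity
  have hu : x % 2 ^ (32 - s) < 2 ^ (32 - s) := Nat.mod_lt _ hpos
  have hv : x / 2 ^ (32 - s) < 2 ^ s := by
    rw [Nat.div_lt_iff_lt_mul hpos]
    calc x < 2 ^ 32 := hx
      _ = 2 ^ s * 2 ^ (32 - s) := by rw [← pow_add]; congr 1; omega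
  calc x % 2 ^ (32 - s) * 2 ^ s + x / 2 ^ (32 - s)
      < x % 2 ^ (32 - s) * 2 ^ s + 2 ^ s := by omega
    _ = (x % 2 ^ (32 - s) + 1) * 2 ^ s := by ring
    _ ≤ 2 ^ (32 - s) * 2 ^ s := Nat.mul_le_mul_right _ (by omega)
    _ = 2 ^ 32 := by rw [← pow_add]; congr 1; omega

-- the heart: one pvStep advances the rotation amount by one (mod 32)
lemma pv_rol_step (x s : ℕ) (hx : x < 2 ^ 32) (hs : s < 32) :
    pvStep (pvRol x s) = pvRol x ((s + 1) % 32) := by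
  by_cases h31 : s = 31
  · subst h31
    unfold pvStep pvRol
    norm_num
    rcases Nat.mod_two_eq_zero_or_one x with hb | hb <;> rw [hb] <;> omega
  · have hs' : s < 31 := by omega
    set t := 32 - s with ht
    have ht2 : 2 ≤ t := by omega
    have e1 : 2 ^ (t - 1) * 2 ^ s = 2 ^ 31 := by rw [← pow_add]; congr 1; omega
    have e2 : 2 ^ t = 2 * 2 ^ (t - 1) := pv_pow_pred (by omega)
    have e3 : 2 ^ (32 - (s + 1)) = 2 ^ (t - 1) := by
      have h32 : 32 - (s + 1) = t - 1 := by omega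
      rw [h32]
    have hpos : 0 < 2 ^ (t - 1) := by positivity
    have hpost : 0 < 2 ^ t := by positivity
    set u := x % 2 ^ t with hu
    set v := x / 2 ^ t with hv0
    set b := u / 2 ^ (t - 1) with hb0
    set c := u % 2 ^ (t - 1) with hc0
    have hult : u < 2 ^ t := Nat.mod_lt _ hpost
    have hvlt : v < 2 ^ s := by
      rw [hv0, Nat.div_lt_iff_lt_mul hpost]
      calc x < 2 ^ 32 := hx
        _ = 2 ^ s * 2 ^ t := by rw [← pow_add]; congr 1; omega
    have hblt : b < 2 := by
      rw [hb0, Nat.div_lt_iff_lt_mul hpos]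
      omega
    have hclt : c < 2 ^ (t - 1) := Nat.mod_lt _ hpos
    have hu2 : u = b * 2 ^ (t - 1) + c := by
      rw [hb0, hc0, mul_comm]
      exact (Nat.div_add_mod u (2 ^ (t - 1))).symm
    have hr : u * 2 ^ s + v = b * 2 ^ 31 + (c * 2 ^ s + v) := by
      calc u * 2 ^ s + v = (b * 2 ^ (t - 1) + c) * 2 ^ s + v := by rw [← hu2]
        _ = b * (2 ^ (t - 1) * 2 ^ s) + (c * 2 ^ s + v) := by ring
        _ = b * 2 ^ 31 + (c * 2 ^ s + v) := by rw [e1]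
    have hcv : c * 2 ^ s + v < 2 ^ 31 := by
      calc c * 2 ^ s + v < c * 2 ^ s + 2 ^ s := by omega
        _ = (c + 1) * 2 ^ s := by ring
        _ ≤ 2 ^ (t - 1) * 2 ^ s := Nat.mul_le_mul_right _ (by omega)
        _ = 2 ^ 31 := e1
    have hxm : x % 2 ^ (t - 1) = c := by
      rw [hc0, hu, Nat.mod_mod_of_dvd x (pow_dvd_pow 2 (by omega))]
    have hxd : x / 2 ^ (t - 1) = 2 * v + b := by
      have hx2 : x = (2 * v + b) * 2 ^ (t - 1) + c := by
        have hdm : 2 ^ t * v + u = x := by rw [hu, hv0]; exact Nat.div_add_mod x (2 ^ t)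
        calc x = 2 ^ t * v + u := hdm.symm
          _ = 2 * 2 ^ (t - 1) * v + (b * 2 ^ (t - 1) + c) := by rw [← e2, ← hu2]
          _ = (2 * v + b) * 2 ^ (t - 1) + c := by ring
      rw [hx2, mul_comm, Nat.mul_add_div hpos, Nat.div_eq_of_lt hclt, add_zero]
    have hmod : (s + 1) % 32 = s + 1 := Nat.mod_eq_of_lt (by omega)
    unfold pvStep pvRol
    rw [← ht, hmod, e3, hxm, hxd, hr]
    have hm1 : (b * 2 ^ 31 + (c * 2 ^ s + v)) % 2 ^ 31 = c * 2 ^ s + v := by omega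
    have hd1 : (b * 2 ^ 31 + (c * 2 ^ s + v)) / 2 ^ 31 = b := by omega
    rw [hm1, hd1, pow_succ]
    ring

lemma pv_iter_rol (x : ℕ) (hx : x < 2 ^ 32) : ∀ n : ℕ, pvStep^[n + 1] x = pvRol x ((n + 1) % 32) := by
  intro n
  induction n with
  | zero =>
    rw [Function.iterate_one]
    unfold pvStep pvRol
    norm_num
    omega
  | succ n ih =>
    rw [Function.iterate_succ_apply', ih, pv_rol_step x _ hx (Nat.mod_lt _ (by norm_num))]
    congr 1
    omega

-- B's shift/or expression, at the Nat level
lemma pv_alt_nat (x s : ℕ) (hx : x < 2 ^ 32) (hs : s < 32) :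
    (x <<< s ||| x / 2 ^ (32 - s)) % 2 ^ 32 = pvRol x s := by
  have hpos : 0 < 2 ^ (32 - s) := by positivity
  have hv : x / 2 ^ (32 - s) < 2 ^ s := by
    rw [Nat.div_lt_iff_lt_mul hpos]
    calc x < 2 ^ 32 := hx
      _ = 2 ^ s * 2 ^ (32 - s) := by rw [← pow_add]; congr 1; omega
  rw [pv_or_shift _ _ hv]
  have hsplit : x * 2 ^ s = (x / 2 ^ (32 - s)) * 2 ^ 32 + x % 2 ^ (32 - s) * 2 ^ s := by
    calc x * 2 ^ s = (2 ^ (32 - s) * (x / 2 ^ (32 - s)) + x % 2 ^ (32 - s)) * 2 ^ s := by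
          rw [Nat.div_add_mod]
      _ = (x / 2 ^ (32 - s)) * (2 ^ (32 - s) * 2 ^ s) + x % 2 ^ (32 - s) * 2 ^ s := by ring
      _ = (x / 2 ^ (32 - s)) * 2 ^ 32 + x % 2 ^ (32 - s) * 2 ^ s := by
          rw [← pow_add, show 32 - s + s = 32 by omega]
  rw [hsplit, add_assoc, mul_comm (x / 2 ^ (32 - s)) (2 ^ 32), Nat.mul_add_mod]
  exact Nat.mod_eq_of_lt (pv_rol_lt x s hx hs)

-- B's port evaluates to pvRol of the low 32 bits by (max src1 0) % 32
lemma pv_alt_eval (src0 src1 : Int) (h1 : -(2 ^ 31) ≤ src0) (h2 : src0 < 2 ^ 32) :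
    gen_expect_rol_alt src0 src1 = ((pvRol (src0 % 2 ^ 32).toNat ((max src1 0).toNat % 32) : ℕ) : Int) := by
  rw [show gen_expect_rol_alt src0 src1 =
      PySem.Int.band
        (PySem.Int.bor ((PySem.Int.band src0 0xFFFFFFFF) <<< (PySem.Int.mod (max src1 0) 32).toNat)
          ((PySem.Int.band src0 0xFFFFFFFF) >>> (32 - (PySem.Int.mod (max src1 0) 32).toNat)))
        0xFFFFFFFF from rfl]
  rw [pv_low src0 h1 h2]
  set x := (src0 % 2 ^ 32).toNat with hx0
  have hx : x < 2 ^ 32 := by omega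
  have hsval : (PySem.Int.mod (max src1 0) 32).toNat = (max src1 0).toNat % 32 := by
    rw [PySem.Int.mod_eq_emod_of_pos (by norm_num : (0:Int) < 32)]
    omega
  rw [hsval]
  set s := (max src1 0).toNat % 32 with hs0
  have hs : s < 32 := Nat.mod_lt _ (by norm_num)
  rw [Int.shiftLeft_eq, Int.shiftRight_eq_div_pow]
  rw [show ((x : ℕ) : Int) * 2 ^ s = ((x * 2 ^ s : ℕ) : Int) by push_cast; ring]
  rw [show ((x : ℕ) : Int) / ((2 ^ (32 - s) : ℕ) : Int) = ((x / 2 ^ (32 - s) : ℕ) : Int) from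
    (Int.natCast_ediv x (2 ^ (32 - s))).symm]
  rw [PySem.Int.bor_natCast]
  rw [PySem.Int.band_of_nonneg (by positivity) (by norm_num : (0:Int) ≤ 0xFFFFFFFF)]
  rw [show (0xFFFFFFFF : Int).toNat = 0xffffffff from rfl, Int.toNat_natCast, pv_and_mask]
  rw [show x * 2 ^ s = x <<< s from (Nat.shiftLeft_eq x s).symm]
  rw [pv_alt_nat x s hx hs]

-- ===== VERDICT (by name: the statement is the Claim_ definition above) =====
theorem gen_expect_rol_spec : Claim_equal_gen_expect_rol := by
  intro src0 src1 hdom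
  unfold Dom_gen_expect_rol pvDomInt at hdom
  simp only [Bool.and_eq_true, decide_eq_true_eq] at hdom
  obtain ⟨⟨h0l, h0r⟩, h1l, h1r⟩ := hdom
  unfold Spec_gen_expect_rol
  have hlo : -(2 ^ 31 : Int) ≤ src0 := by omega
  have hhi : src0 < 2 ^ 32 := by omega
  set x := (src0 % 2 ^ 32).toNat with hx0
  have hx : x < 2 ^ 32 := by omega
  rw [pv_alt_eval src0 src1 hlo hhi, ← hx0]
  unfold gen_expect_rol
  rw [pv_fold_fst, PySem.List.length_pyRange_one]
  by_cases hpos : src1 ≤ 0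
  · rw [show (src1 - 0).toNat = 0 by omega]
    rw [show max src1 0 = 0 by omega]
    simp only [Function.iterate_zero, id_eq]
    rw [pv_low src0 hlo hhi]
    rw [show ((0 : Int).toNat % 32) = 0 from rfl]
    unfold pvRol
    congr 1
    omega
  · have hn : 1 ≤ (src1 - 0).toNat := by omega
    set n := (src1 - 0).toNat with hn0
    rw [show n = (n - 1) + 1 by omega, Function.iterate_succ_apply]
    rw [show (src0, (0 : Int)).1 = src0 from rfl]
    rw [pv_step_bridge src0 hlo hhi, ← hx0]
    rw [pv_iter_bridge (n - 1) _ (pvStep_lt hx)]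
    rw [← Function.iterate_succ_apply, pv_iter_rol x hx (n - 1)]
    rw [show (n - 1 + 1) = n by omega]
    have hfin : pvRol x (n % 32) < 2 ^ 32 := pv_rol_lt x _ hx (Nat.mod_lt _ (by norm_num))
    rw [pv_low _ (by omega) (by omega)]
    have hmax : (max src1 0).toNat = n := by omega
    rw [hmax]
    omega
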